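-- pv_equiv track=rewrite | github.com/MicSie/adventofcode_2022 | day07/task.py | split_instructions
-- ===== SOURCE A (Python) =====
-- def split_instructions(instructions: list[str]) -> list[list[str]]:
--     split_instructions = []
--     current_set = []
--
--     for instruction in instructions:
--         if instruction.startswith('$ cd'):
--             if len(current_set) > 0:
--                 split_instructions.append(current_set)
--             split_instructions.append([instruction])
--             current_set = []
--         else:
--             current_set.append(instruction)
--
--     if len(current_set) > 0:
--         split_instructions.append(current_set)
--     return split_instructions
-- ===== SOURCE B (Python) =====
-- def split_instructions(instructions: list[str]) -> list[list[str]]: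
--     # Recursive decomposition: slice at the first '$ cd' instruction and recurse on the rest.
--     for i, x in enumerate(instructions):
--         if x.startswith('$ cd'):
--             head = [instructions[:i]] if i > 0 else []
--             return head + [[x]] + split_instructions(instructions[i + 1:])
--     return [instructions] if instructions else []
-- ===== Notes on version B (the rewrite author's own statement) =====
-- stated objective: alternative
-- what changed: Replaces A's single-pass running-accumulator loop (pending group flushed at each '$ cd') by a recursive decomposition that finds the first '$ cd' instruction, emits the leading slice (if non-empty) and the cd singleton, and recurses on the remaining slice.
import Mathlib
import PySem

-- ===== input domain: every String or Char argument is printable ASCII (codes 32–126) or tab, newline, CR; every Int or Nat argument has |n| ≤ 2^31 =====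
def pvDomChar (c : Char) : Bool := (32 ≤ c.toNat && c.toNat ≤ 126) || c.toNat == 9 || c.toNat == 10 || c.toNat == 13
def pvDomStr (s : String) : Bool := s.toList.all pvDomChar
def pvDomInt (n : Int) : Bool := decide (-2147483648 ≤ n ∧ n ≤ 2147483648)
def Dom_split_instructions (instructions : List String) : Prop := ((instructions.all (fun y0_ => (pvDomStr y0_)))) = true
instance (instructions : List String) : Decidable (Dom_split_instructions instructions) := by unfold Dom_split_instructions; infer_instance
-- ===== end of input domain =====

-- B replaces A's running-accumulator loop by a recursive slice-at-the-first-'$ cd' decomposition (same cost, different structure).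

-- ===== PORT A =====
def split_instructions (instructions : List String) : List (List String) :=
  let st := instructions.foldl
    (fun (p : List (List String) × List String) instruction =>
      if PySem.Str.startswith instruction "$ cd" then
        ((if p.2.length > 0 then p.1 ++ [p.2] else p.1) ++ [[instruction]], [])
      else
        (p.1, p.2 ++ [instruction]))
    ([], [])
  if st.2.length > 0 then st.1 ++ [st.2] else st.1

-- ===== PORT B =====
-- Source B's `for i, x in enumerate(...)` scan for the first '$ cd' instruction
def pvFirstCd : List String → Option (Nat × String)
  | [] => none
  | x :: xs =>
    if PySem.Str.startswith x "$ cd" then some (0, x)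
    else (pvFirstCd xs).map (fun p => (p.1 + 1, p.2))

-- termination fact the port cites: the found index is in range
theorem pvFirstCd_lt : ∀ (xs : List String) (i : Nat) (x : String),
    pvFirstCd xs = some (i, x) → i < xs.length := by
  intro xs
  induction xs with
  | nil => intro i x h; simp only [pvFirstCd] at h; exact absurd h (by simp)
  | cons y ys ih =>
    intro i x h
    simp only [pvFirstCd] at h
    cases hb : PySem.Str.startswith y "$ cd" with
    | true =>
      rw [if_pos hb] at h
      have h' : (0 : Nat) = i ∧ y = x := by simpa using h
      simp only [List.length_cons]
      omega
    | false =>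
      rw [if_neg (by rw [hb]; simp)] at h
      cases hm : pvFirstCd ys with
      | none => rw [hm] at h; exact absurd h (by simp)
      | some p =>
        obtain ⟨j, z⟩ := p
        rw [hm] at h
        have hj := ih j z hm
        have h' : j + 1 = i ∧ z = x := by simpa using h
        simp only [List.length_cons]
        omega

-- the slices instructions[:i] / instructions[i+1:] are exact for 0 ≤ i < len: take / drop
def split_instructions_alt (instructions : List String) : List (List String) :=
  match h : pvFirstCd instructions with
  | some (i, x) =>
      (if 0 < i then [instructions.take i] else []) ++
        ([x] :: split_instructions_alt (instructions.drop (i + 1)))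
  | none => if instructions.isEmpty then [] else [instructions]
termination_by instructions.length
decreasing_by
  have := pvFirstCd_lt instructions i x h
  simp only [List.length_drop]
  omega

-- ===== PRECONDITION & SPEC =====
def Spec_split_instructions (instructions : List String) (out : List (List String)) : Prop := out = split_instructions_alt instructions
instance (instructions : List String) (out : List (List String)) : Decidable (Spec_split_instructions instructions out) := by unfold Spec_split_instructions; infer_instance

-- ===== CLAIM (what is proved, stated in full; the proofs are below) =====
def Claim_equal_split_instructions : Prop := ∀ (instructions : List String), Dom_split_instructions instructions → Spec_split_instructions instructions (split_instructions instructions)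

-- ===== LEMMAS AND PROOFS =====

-- A's loop body, named for the proofs (definitionally the lambda in the port)
def pvStep (p : List (List String) × List String) (instruction : String) :
    List (List String) × List String :=
  if PySem.Str.startswith instruction "$ cd" then
    ((if p.2.length > 0 then p.1 ++ [p.2] else p.1) ++ [[instruction]], [])
  else
    (p.1, p.2 ++ [instruction])

-- reference recursion: A's loop state made structural (cur = pending group)
def pvGo : List String → List String → List (List String)
  | cur, [] => if cur.length > 0 then [cur] else []
  | cur, x :: xs =>
    if PySem.Str.startswith x "$ cd" then
      (if cur.length > 0 then [cur] else []) ++ ([x] :: pvGo [] xs)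
    else pvGo (cur ++ [x]) xs

theorem pvFoldl_go : ∀ (xs : List String) (acc : List (List String)) (cur : List String),
    (if (xs.foldl pvStep (acc, cur)).2.length > 0
      then (xs.foldl pvStep (acc, cur)).1 ++ [(xs.foldl pvStep (acc, cur)).2]
      else (xs.foldl pvStep (acc, cur)).1) = acc ++ pvGo cur xs := by
  intro xs
  induction xs with
  | nil =>
    intro acc cur
    simp only [List.foldl_nil, pvGo]
    split_ifs <;> simp
  | cons x xs ih =>
    intro acc cur
    rw [List.foldl_cons]
    cases hb : PySem.Str.startswith x "$ cd" with
    | true =>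
      have hstep : pvStep (acc, cur) x =
          ((if cur.length > 0 then acc ++ [cur] else acc) ++ [[x]], []) := by
        simp only [pvStep]; rw [if_pos hb]
      rw [hstep, ih]
      simp only [pvGo]
      rw [if_pos hb]
      split_ifs <;> simp
    | false =>
      have hstep : pvStep (acc, cur) x = (acc, cur ++ [x]) := by
        simp only [pvStep]; rw [if_neg (by rw [hb]; simp)]
      rw [hstep, ih]
      simp only [pvGo]
      rw [if_neg (by rw [hb]; simp)]

theorem pvFirstCd_none (cur : List String)
    (h : ∀ y ∈ cur, PySem.Str.startswith y "$ cd" = false) : pvFirstCd cur = none := by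
  induction cur with
  | nil => rfl
  | cons y ys ih =>
    have hy := h y (by simp)
    simp only [pvFirstCd]
    rw [if_neg (by rw [hy]; simp), ih (fun z hz => h z (by simp [hz]))]
    rfl

theorem pvFirstCd_append (cur : List String) (x : String) (xs : List String)
    (h : ∀ y ∈ cur, PySem.Str.startswith y "$ cd" = false)
    (hx : PySem.Str.startswith x "$ cd" = true) :
    pvFirstCd (cur ++ x :: xs) = some (cur.length, x) := by
  induction cur with
  | nil => simp only [List.nil_append, pvFirstCd]; rw [if_pos hx]; rfl
  | cons y ys ih =>
    have hy := h y (by simp)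
    simp only [List.cons_append, pvFirstCd]
    rw [if_neg (by rw [hy]; simp), ih (fun z hz => h z (by simp [hz]))]
    rfl

theorem pvGo_alt : ∀ (xs cur : List String),
    (∀ y ∈ cur, PySem.Str.startswith y "$ cd" = false) →
    pvGo cur xs = split_instructions_alt (cur ++ xs) := by
  intro xs
  induction xs with
  | nil =>
    intro cur hcur
    rw [List.append_nil, split_instructions_alt.eq_def]
    have hn := pvFirstCd_none cur hcur
    split
    · rename_i i x h
      rw [hn] at h
      exact absurd h (by simp)
    · simp only [pvGo]
      cases cur <;> simp
  | cons x xs ih =>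
    intro cur hcur
    cases hb : PySem.Str.startswith x "$ cd" with
    | true =>
      rw [split_instructions_alt.eq_def]
      have hf := pvFirstCd_append cur x xs hcur hb
      split
      · rename_i i x' h
        rw [hf] at h
        have h1 : cur.length = i := by simpa using congrArg (fun o => o.map Prod.fst) h
        have h2 : x = x' := by simpa using congrArg (fun o => o.map Prod.snd) h
        subst h1 h2
        have htake : (cur ++ x :: xs).take cur.length = cur := by simp
        have hdrop : (cur ++ x :: xs).drop (cur.length + 1) = xs := by
          have he : cur ++ x :: xs = (cur ++ [x]) ++ xs := by simp
          have hl : (cur ++ [x]).length = cur.length + 1 := by simp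
          rw [he, ← hl, List.drop_left]
        have hIH := ih [] (by simp)
        rw [List.nil_append] at hIH
        rw [htake, hdrop, ← hIH]
        simp only [pvGo]
        rw [if_pos hb]
      · rename_i h
        rw [hf] at h
        exact absurd h (by simp)
    | false =>
      simp only [pvGo]
      rw [if_neg (by rw [hb]; simp)]
      have he : cur ++ x :: xs = (cur ++ [x]) ++ xs := by simp
      rw [he, ← ih (cur ++ [x]) ?_]
      intro z hz
      rcases List.mem_append.mp hz with h1 | h1
      · exact hcur z h1
      · simp at h1; subst h1; exact hb

-- ===== VERDICT (by name: the statement is the Claim_ definition above) =====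
theorem split_instructions_spec : Claim_equal_split_instructions := by
  intro instructions _
  unfold Spec_split_instructions
  show (if (instructions.foldl pvStep ([], [])).2.length > 0
      then (instructions.foldl pvStep ([], [])).1 ++ [(instructions.foldl pvStep ([], [])).2]
      else (instructions.foldl pvStep ([], [])).1) = split_instructions_alt instructions
  rw [pvFoldl_go, pvGo_alt instructions [] (by simp)]
  simp
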